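-- pv_equiv track=rewrite | github.com/V-Aymeric/Generateur_procedural | world_generation.py | generate_grammary_2
-- ===== SOURCE A (Python) =====
-- grammary_dict_2 = {
--     "A": "B",
--     "B": "H",
--     "C": "F",
--     "D": "B",
--     "E": "D",
--     "F": "D",
--     "G": "H",
--     "H": "B",
--     "I": "F",
--     "J": "F",
--     "K": "H",
--     "L": "B",
--     "M": "C",
--     "N": "E",
--     "O": "A",
--     "P": "E",
--     "Q": "E",
--     "R": "A",
--     "S": "C",
--     "T": "A",
--     "U": "B",
--     "V": "G",
--     "W": "G",
--     "X": "H",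
--     "Y": "G",
--     "Z": "E"
-- }
--
-- def generate_grammary_2(arg_str):
--     tmp_str = ""
--     for i in range(4):
--         for c in arg_str:
--             tmp_str += grammary_dict_2[c]
--         arg_str = tmp_str
--         tmp_str = ""
--
--     return arg_str
-- ===== SOURCE B (Python) =====
-- grammary_dict_2 = {
--     "A": "B", "B": "H", "C": "F", "D": "B", "E": "D", "F": "D", "G": "H",
--     "H": "B", "I": "F", "J": "F", "K": "H", "L": "B", "M": "C", "N": "E",
--     "O": "A", "P": "E", "Q": "E", "R": "A", "S": "C", "T": "A", "U": "B",
--     "V": "G", "W": "G", "X": "H", "Y": "G", "Z": "E"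
-- }
--
-- def generate_grammary_2(arg_str):
--     # index-addressed table: table[i] is the image of chr(65+i); compose it 4 times,
--     # then translate the input by direct indexing in one pass
--     table = [chr(65 + i) for i in range(26)]
--     for _ in range(4):
--         table = [grammary_dict_2[v] for v in table]
--     return "".join(table[ord(c) - 65] for c in arg_str)
-- ===== Notes on version B (the rewrite author's own statement) =====
-- stated objective: alternative
-- what changed: Instead of four sequential full-string rebuild passes through the dict, B composes the mapping once into a 26-slot index-addressed table (four map passes over the 26-element table) and translates the input by direct table[ord(c)-65] indexing in a single pass.
import Mathlib
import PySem

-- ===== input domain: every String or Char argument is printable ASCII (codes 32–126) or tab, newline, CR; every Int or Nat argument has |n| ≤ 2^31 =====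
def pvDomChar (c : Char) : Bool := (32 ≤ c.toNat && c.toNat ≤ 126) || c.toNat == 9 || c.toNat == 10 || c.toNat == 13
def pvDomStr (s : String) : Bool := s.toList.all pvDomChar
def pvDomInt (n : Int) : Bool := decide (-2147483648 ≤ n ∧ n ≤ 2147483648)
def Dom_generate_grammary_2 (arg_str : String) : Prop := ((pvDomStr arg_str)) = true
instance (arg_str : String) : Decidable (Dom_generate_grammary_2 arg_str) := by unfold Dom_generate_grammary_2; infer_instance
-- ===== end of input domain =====

-- B replaces A's four full-string rebuild passes by one 26-entry index table composed 4 times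
-- plus a single index-translation pass over the input (objective: alternative decomposition).

-- ===== PORT A =====
-- the module dict grammary_dict_2, as Python has it: 1-char string keys and values
def gdictA : PySem.Dict String String :=
  PySem.Dict.ofList
    [("A","B"),("B","H"),("C","F"),("D","B"),("E","D"),("F","D"),("G","H"),
     ("H","B"),("I","F"),("J","F"),("K","H"),("L","B"),("M","C"),("N","E"),
     ("O","A"),("P","E"),("Q","E"),("R","A"),("S","C"),("T","A"),("U","B"),
     ("V","G"),("W","G"),("X","H"),("Y","G"),("Z","E")]

-- tmp_str += grammary_dict_2[c]; KeyError (none) is excluded by Pre_, "?" is an arbitrary fallback there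
def astep (c : Char) : List Char := ((gdictA.get? (String.mk [c])).getD "?").toList

-- literal port of A: four passes, each rebuilding tmp_str by appending dict lookups
def generate_grammary_2 (arg_str : String) : String :=
  String.mk ((List.range 4).foldl
    (fun s _ => s.foldl (fun tmp c => tmp ++ astep c) []) arg_str.toList)

-- ===== PORT B =====
-- grammary_dict_2 as B reads it: each 1-char key/value string as its character
def gpairsB : List (Char × Char) :=
  [('A','B'),('B','H'),('C','F'),('D','B'),('E','D'),('F','D'),('G','H'),
   ('H','B'),('I','F'),('J','F'),('K','H'),('L','B'),('M','C'),('N','E'),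
   ('O','A'),('P','E'),('Q','E'),('R','A'),('S','C'),('T','A'),('U','B'),
   ('V','G'),('W','G'),('X','H'),('Y','G'),('Z','E')]

-- grammary_dict_2[v] during the table build
def bstep (v : Char) : Char := (List.lookup v gpairsB).getD '?'

-- literal port of B: identity table over chr(65+i), composed 4 times, then table[ord(c)-65]
def generate_grammary_2_alt (arg_str : String) : String :=
  let t0 : List Char := (List.range 26).map (fun i => Char.ofNat (65 + i))
  let t : List Char := (List.range 4).foldl (fun tb _ => tb.map bstep) t0
  String.mk (arg_str.toList.map
    (fun c => (PySem.List.pyGet? t ((c.toNat : Int) - 65)).getD '?'))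

-- ===== PRECONDITION & SPEC =====
-- Pre_ excludes exactly the inputs on which the Python A raises KeyError: strings with a character outside the dict keys 'A'..'Z'
def Pre_generate_grammary_2 (arg_str : String) : Prop :=
  (arg_str.toList.all (fun c => 65 ≤ c.toNat && c.toNat ≤ 90)) = true
instance (arg_str : String) : Decidable (Pre_generate_grammary_2 arg_str) := by
  unfold Pre_generate_grammary_2; infer_instance

def pvWitness_generate_grammary_2 : String := "ABCZ"

def Spec_generate_grammary_2 (arg_str : String) (out : String) : Prop := out = generate_grammary_2_alt arg_str
instance (arg_str : String) (out : String) : Decidable (Spec_generate_grammary_2 arg_str out) := by unfold Spec_generate_grammary_2; infer_instance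

-- ===== CLAIM (what is proved, stated in full; the proofs are below) =====
def Claim_equal_generate_grammary_2 : Prop := ∀ (arg_str : String), Dom_generate_grammary_2 arg_str → Pre_generate_grammary_2 arg_str → Spec_generate_grammary_2 arg_str (generate_grammary_2 arg_str)

-- ===== LEMMAS AND PROOFS =====

-- the 26 keys as characters
def keysL : List Char := (List.range 26).map (fun i => Char.ofNat (65 + i))

theorem mem_keysL {c : Char} (h1 : 65 ≤ c.toNat) (h2 : c.toNat ≤ 90) : c ∈ keysL := by
  refine List.mem_map.mpr ⟨c.toNat - 65, List.mem_range.mpr (by omega), ?_⟩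
  rw [Nat.add_sub_cancel' h1, Char.ofNat_toNat]

-- on every key, A's lookup is the singleton of B's char-level step, and the step stays inside the keys
theorem astep_eq_bstep {c : Char} (h : c ∈ keysL) :
    astep c = [bstep c] ∧ 65 ≤ (bstep c).toNat ∧ (bstep c).toNat ≤ 90 := by
  have hall : keysL.all
      (fun c => astep c == [bstep c] && (65 ≤ (bstep c).toNat && (bstep c).toNat ≤ 90)) = true := by
    decide
  simpa using List.all_eq_true.mp hall c h

-- one inner pass of A is a flatMap of lookups, hence a map of bstep on key-only strings
theorem passA_eq_map (l : List Char) (h : ∀ c ∈ l, c ∈ keysL) :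
    l.foldl (fun tmp c => tmp ++ astep c) [] = l.map bstep := by
  rw [PySem.List.foldl_append_eq_flatMap]
  simp only [List.nil_append]
  induction l with
  | nil => rfl
  | cons a t ih =>
    simp only [List.flatMap_cons, List.map_cons]
    rw [(astep_eq_bstep (h a List.mem_cons_self)).1,
        ih (fun c hc => h c (List.mem_cons_of_mem a hc))]
    rfl

theorem map_bstep_keys {l : List Char} (h : ∀ c ∈ l, c ∈ keysL) :
    ∀ c ∈ l.map bstep, c ∈ keysL := by
  intro c hc
  obtain ⟨a, ha, rfl⟩ := List.mem_map.mp hc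
  obtain ⟨_, h1, h2⟩ := astep_eq_bstep (h a ha)
  exact mem_keysL h1 h2

-- B's composed table lookup is four char-level steps, on every key (checked on the 26 keys)
theorem table_lookup_eq (c : Char) (h : c ∈ keysL) :
    (PySem.List.pyGet? (((((List.range 26).map (fun i => Char.ofNat (65 + i))).map bstep).map
        bstep).map bstep |>.map bstep) ((c.toNat : Int) - 65)).getD '?'
      = bstep (bstep (bstep (bstep c))) := by
  have hall : keysL.all
      (fun c => (PySem.List.pyGet? (((((List.range 26).map (fun i => Char.ofNat (65 + i))).map
        bstep).map bstep).map bstep |>.map bstep) ((c.toNat : Int) - 65)).getD '?'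
        == bstep (bstep (bstep (bstep c)))) = true := by decide
  exact of_decide_eq_true (List.all_eq_true.mp hall c h)

-- ===== VERDICT (by name: the statement is the Claim_ definition above) =====
theorem generate_grammary_2_spec : Claim_equal_generate_grammary_2 := by
  intro s _ hpre
  unfold Pre_generate_grammary_2 at hpre
  have hk : ∀ c ∈ s.toList, c ∈ keysL := by
    intro c hc
    have := List.all_eq_true.mp hpre c hc
    simp only [Bool.and_eq_true, decide_eq_true_eq] at this
    exact mem_keysL this.1 this.2
  unfold Spec_generate_grammary_2 generate_grammary_2 generate_grammary_2_alt
  have hr4 : List.range 4 = [0,1,2,3] := by decide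
  rw [hr4]
  simp only [List.foldl_cons, List.foldl_nil]
  have h1 := hk
  have h2 := map_bstep_keys h1
  have h3 := map_bstep_keys h2
  have h4 := map_bstep_keys h3
  rw [passA_eq_map _ h1, passA_eq_map _ h2, passA_eq_map _ h3, passA_eq_map _ h4]
  rw [List.map_congr_left (fun c hc => table_lookup_eq c (hk c hc))]
  simp only [List.map_map]
  rfl
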